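-- pv_equiv track=rewrite | github.com/HashemFarhan/finance_scraper | extractors/link_extractor.py | _best_link
-- ===== SOURCE A (Python) =====
-- def _best_link(
--     anchors: list[dict[str, str]], keywords: tuple[str, ...]
-- ) -> dict[str, str] | None:
--     scored = []
--     for anchor in anchors:
--         text = str(anchor.get("text", ""))
--         href = str(anchor.get("href", ""))
--         score = 0
--         for keyword in keywords:
--             if keyword in text.lower():
--                 score += 100
--             if keyword.replace(" ", "-") in href.lower() or keyword in href.lower():
--                 score += 60
--         if score:
--             scored.append((score, anchor))
--     if not scored:
--         return None
--     scored.sort(key=lambda item: item[0], reverse=True)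
--     return scored[0][1]
-- ===== SOURCE B (Python) =====
-- def _score(anchor, keywords):
--     text = str(anchor.get("text", "")).lower()
--     href = str(anchor.get("href", "")).lower()
--     score = 0
--     for keyword in keywords:
--         if keyword in text:
--             score += 100
--         if keyword.replace(" ", "-") in href or keyword in href:
--             score += 60
--     return score
--
--
-- def _best_link(
--     anchors: list[dict[str, str]], keywords: tuple[str, ...]
-- ) -> dict[str, str] | None:
--     best_score, best = 0, None
--     for anchor in anchors:
--         score = _score(anchor, keywords)
--         if score > best_score:
--             best_score, best = score, anchor
--     return best
-- ===== Notes on version B (the rewrite author's own statement) =====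
-- stated objective: simpler
-- what changed: Replaces the build-filter-sort pipeline (scored list + stable descending sort + head) by a single pass that keeps a running best anchor, updating only on a strictly greater score so the first maximal anchor wins exactly as the stable sort did.
import Mathlib
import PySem

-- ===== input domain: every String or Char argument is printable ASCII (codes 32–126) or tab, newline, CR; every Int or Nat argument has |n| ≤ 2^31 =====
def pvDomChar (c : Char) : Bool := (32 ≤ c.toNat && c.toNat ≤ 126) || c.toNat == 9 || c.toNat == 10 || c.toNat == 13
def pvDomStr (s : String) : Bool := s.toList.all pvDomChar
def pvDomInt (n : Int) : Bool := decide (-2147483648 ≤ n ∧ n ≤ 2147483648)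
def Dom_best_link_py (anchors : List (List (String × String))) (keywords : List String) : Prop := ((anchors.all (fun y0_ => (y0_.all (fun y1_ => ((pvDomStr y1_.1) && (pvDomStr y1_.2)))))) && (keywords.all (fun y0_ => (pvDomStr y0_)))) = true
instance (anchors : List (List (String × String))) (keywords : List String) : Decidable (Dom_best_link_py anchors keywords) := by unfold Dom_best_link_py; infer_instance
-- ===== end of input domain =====

-- B replaces A's scored-list + stable descending sort + head by one pass keeping the
-- running best anchor (strict '>' so the first maximal anchor wins, like the stable sort).

-- ===== PORT A =====
def best_link_py (anchors : List (List (String × String))) (keywords : List String) : Option (List (String × String)) :=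
  let scored := anchors.foldl (fun scored anchor =>
    let text := (PySem.Dict.mk anchor).getD "text" ""
    let href := (PySem.Dict.mk anchor).getD "href" ""
    let score := keywords.foldl (fun score keyword =>
      let score := if PySem.Str.isIn keyword (PySem.Str.lower text) then score + 100 else score
      if PySem.Str.isIn (PySem.Str.replace keyword " " "-") (PySem.Str.lower href)
          || PySem.Str.isIn keyword (PySem.Str.lower href) then score + 60 else score) (0 : Int)
    if score ≠ 0 then scored ++ [(score, anchor)] else scored)
    ([] : List (Int × List (String × String)))
  if scored = [] then none
  else
    match PySem.List.sorted scored (fun it => it.1) true with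
    | [] => none
    | q :: _ => some q.2

-- ===== PORT B =====
def scoreOf (anchor : List (String × String)) (keywords : List String) : Int :=
  let text := PySem.Str.lower ((PySem.Dict.mk anchor).getD "text" "")
  let href := PySem.Str.lower ((PySem.Dict.mk anchor).getD "href" "")
  keywords.foldl (fun score keyword =>
    let score := if PySem.Str.isIn keyword text then score + 100 else score
    if PySem.Str.isIn (PySem.Str.replace keyword " " "-") href
        || PySem.Str.isIn keyword href then score + 60 else score) 0

def best_link_py_alt (anchors : List (List (String × String))) (keywords : List String) : Option (List (String × String)) :=
  (anchors.foldl (fun best anchor =>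
      let score := scoreOf anchor keywords
      if score > best.1 then (score, some anchor) else best)
    ((0 : Int), (none : Option (List (String × String))))).2

-- ===== PRECONDITION & SPEC =====
def Spec_best_link_py (anchors : List (List (String × String))) (keywords : List String) (out : Option (List (String × String))) : Prop := out = best_link_py_alt anchors keywords
instance (anchors : List (List (String × String))) (keywords : List String) (out : Option (List (String × String))) : Decidable (Spec_best_link_py anchors keywords out) := by unfold Spec_best_link_py; infer_instance

-- ===== CLAIM (what is proved, stated in full; the proofs are below) =====
def Claim_equal_best_link_py : Prop := ∀ (anchors : List (List (String × String))) (keywords : List String), Dom_best_link_py anchors keywords → Spec_best_link_py anchors keywords (best_link_py anchors keywords)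

-- ===== LEMMAS AND PROOFS =====

-- running first-max fold over a scored list
def fm {α : Type} (l : List (Int × α)) (b : Int × Option α) : Int × Option α :=
  l.foldl (fun b p => if p.1 > b.1 then (p.1, some p.2) else b) b

-- head-state of a list: (0, none) when empty, else (score, some anchor) of the head
def hs {α : Type} (acc : List (Int × α)) : Int × Option α :=
  match acc with
  | [] => (0, none)
  | q :: _ => (q.1, some q.2)

theorem scoreOf_nonneg (anchor : List (String × String)) (keywords : List String) :
    0 ≤ scoreOf anchor keywords := by
  unfold scoreOf
  generalize (PySem.Str.lower ((PySem.Dict.mk anchor).getD "text" "")) = text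
  generalize (PySem.Str.lower ((PySem.Dict.mk anchor).getD "href" "")) = href
  suffices h : ∀ (l : List String) (s : Int), 0 ≤ s →
      0 ≤ l.foldl (fun score keyword =>
        let score := if PySem.Str.isIn keyword text then score + 100 else score
        if PySem.Str.isIn (PySem.Str.replace keyword " " "-") href
            || PySem.Str.isIn keyword href then score + 60 else score) s by
    exact h keywords 0 le_rfl
  intro l
  induction l with
  | nil => intro s hs; simpa using hs
  | cons k t ih =>
      intro s hs
      simp only [List.foldl]
      apply ih
      split_ifs <;> omega

-- A's scored list is a filter+map of the anchors
theorem scored_eq_filter_map (anchors : List (List (String × String))) (keywords : List String)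
    (acc : List (Int × List (String × String))) :
    anchors.foldl (fun scored anchor =>
      let score := scoreOf anchor keywords
      if score ≠ 0 then scored ++ [(score, anchor)] else scored) acc
    = acc ++ (anchors.filter (fun a => scoreOf a keywords ≠ 0)).map (fun a => (scoreOf a keywords, a)) := by
  induction anchors generalizing acc with
  | nil => simp
  | cons a t ih =>
      rw [List.foldl_cons, ih]
      by_cases h : scoreOf a keywords = 0
      · simp [h]
      · simp [h, List.filter_cons, List.append_assoc]

-- B's fold equals fm over that scored list
theorem bfold_eq_fm (anchors : List (List (String × String))) (keywords : List String)
    (b : Int × Option (List (String × String))) (hb : 0 ≤ b.1) :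
    anchors.foldl (fun best anchor =>
      let score := scoreOf anchor keywords
      if score > best.1 then (score, some anchor) else best) b
    = fm ((anchors.filter (fun a => scoreOf a keywords ≠ 0)).map (fun a => (scoreOf a keywords, a))) b := by
  induction anchors generalizing b with
  | nil => simp [fm]
  | cons a t ih =>
      rw [List.foldl_cons]
      by_cases h : scoreOf a keywords = 0
      · have hng : ¬ (scoreOf a keywords > b.1) := by rw [h]; exact not_lt.mpr hb
        dsimp only
        rw [if_neg hng, ih b hb]
        simp [List.filter_cons, h]
      · have hb2 : 0 ≤ (if scoreOf a keywords > b.1 then (scoreOf a keywords, some a) else b).1 := by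
          split_ifs with hc
          · exact scoreOf_nonneg a keywords
          · exact hb
        dsimp only
        rw [ih _ hb2]
        simp only [List.filter_cons, h, decide_true, ne_eq, not_false_iff, if_pos, List.map_cons]
        rfl

-- one insertion step, seen through hs
theorem hs_insertBy {α : Type} (x : Int × α) (acc : List (Int × α)) (hx : 0 < x.1) :
    hs (PySem.List.insertBy (fun a b => decide (b.1 < a.1)) x acc)
      = (if x.1 > (hs acc).1 then (x.1, some x.2) else hs acc) := by
  cases acc with
  | nil => simp [PySem.List.insertBy, hs, hx]
  | cons q t =>
      show hs (if decide (q.1 < x.1) then x :: q :: t else q :: PySem.List.insertBy _ x t) = _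
      by_cases h : q.1 < x.1
      · simp [h, hs]
      · simp [h, hs]

-- head of the stable descending insertion sort = running first-max
theorem sorted_head_eq_fm {α : Type} (l : List (Int × α)) (hpos : ∀ p ∈ l, 0 < p.1) :
    (match PySem.List.sorted l (fun it => it.1) true with
      | [] => (none : Option α)
      | q :: _ => some q.2)
    = (fm l ((0 : Int), none)).2 := by
  have key : ∀ (m : List (Int × α)) (acc : List (Int × α)), (∀ p ∈ m, 0 < p.1) →
      hs (m.foldl (fun acc x => PySem.List.insertBy (fun a b => decide (b.1 < a.1)) x acc) acc)
        = fm m (hs acc) := by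
    intro m
    induction m with
    | nil => intro acc _; simp [fm]
    | cons x t ih =>
        intro acc hp
        rw [List.foldl_cons, ih _ (fun p hpm => hp p (List.mem_cons_of_mem _ hpm))]
        rw [hs_insertBy x acc (hp x (List.mem_cons_self))]
        simp [fm]
  have hrw := PySem.List.sorted_rev_eq_foldl_insertBy l (fun it : Int × α => it.1)
  have hk := key l [] hpos
  rw [show hs ([] : List (Int × α)) = ((0 : Int), (none : Option α)) from rfl] at hk
  rw [← hk, ← hrw]
  cases PySem.List.sorted l (fun it => it.1) true with
  | nil => simp [hs]
  | cons q t => simp [hs]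

-- ===== VERDICT (by name: the statement is the Claim_ definition above) =====
theorem best_link_py_spec : Claim_equal_best_link_py := by
  intro anchors keywords _
  show best_link_py anchors keywords = best_link_py_alt anchors keywords
  have hA : best_link_py anchors keywords =
      (let scored := anchors.foldl (fun scored anchor =>
          let score := scoreOf anchor keywords
          if score ≠ 0 then scored ++ [(score, anchor)] else scored) []
       if scored = [] then none
       else
        match PySem.List.sorted scored (fun it => it.1) true with
        | [] => none
        | q :: _ => some q.2) := rfl
  have hB : best_link_py_alt anchors keywords =
      (anchors.foldl (fun best anchor =>
          let score := scoreOf anchor keywords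
          if score > best.1 then (score, some anchor) else best)
        ((0 : Int), (none : Option (List (String × String))))).2 := rfl
  rw [hA, hB, bfold_eq_fm _ _ _ le_rfl]
  simp only [scored_eq_filter_map, List.nil_append]
  set L := (anchors.filter (fun a => scoreOf a keywords ≠ 0)).map
      (fun a => (scoreOf a keywords, a)) with hLdef
  have hpos : ∀ p ∈ L, 0 < p.1 := by
    intro p hp
    rw [hLdef] at hp
    simp only [List.mem_map, List.mem_filter] at hp
    obtain ⟨a, ⟨_, hne⟩, rfl⟩ := hp
    have h0 := scoreOf_nonneg a keywords
    have hne' : scoreOf a keywords ≠ 0 := by simpa using hne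
    omega
  by_cases hL : L = []
  · simp [hL, fm]
  · rw [if_neg hL]
    have h := sorted_head_eq_fm L hpos
    cases hS : PySem.List.sorted L (fun it => it.1) true with
    | nil => simp only [hS] at h ⊢; simpa using h
    | cons q t => simp only [hS] at h ⊢; simpa using h
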